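-- pv_equiv track=rewrite | github.com/Nimish299/Information_retrieval | Ass 2/IR_ASSIGNMENT_2/4_probabilisticModels.py | getTokenFrequency
-- ===== SOURCE A (Python) =====
-- def getTokenFrequency(doc_term_frequencies, doc_id, term):
--
--     term_freq_list = doc_term_frequencies.get(doc_id, [])
--
--
--     left, right = 0, len(term_freq_list) - 1
--     while left <= right:
--         mid = left + (right - left) // 2
--         if term_freq_list[mid][0] == term:
--             return term_freq_list[mid][1]
--         elif term_freq_list[mid][0] < term:
--             left = mid + 1
--         else:
--             right = mid - 1
--
--
--     return 0
-- ===== SOURCE B (Python) =====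
-- def getTokenFrequency(doc_term_frequencies, doc_id, term):
--     def search(lst):
--         # divide and conquer on the sorted (term, freq) sublist
--         if not lst:
--             return 0
--         mid = (len(lst) - 1) // 2
--         t, f = lst[mid]
--         if t == term:
--             return f
--         if t < term:
--             return search(lst[mid + 1:])
--         return search(lst[:mid])
--
--     return search(doc_term_frequencies.get(doc_id, []))
-- ===== Notes on version B (the rewrite author's own statement) =====
-- stated objective: alternative
-- what changed: Replaces A's iterative two-pointer binary search over index bounds with a recursive divide-and-conquer that picks the middle element and recurses on the left/right sublist slices; same comparison sequence, hence identical results even on unsorted or duplicate lists.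
import Mathlib
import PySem

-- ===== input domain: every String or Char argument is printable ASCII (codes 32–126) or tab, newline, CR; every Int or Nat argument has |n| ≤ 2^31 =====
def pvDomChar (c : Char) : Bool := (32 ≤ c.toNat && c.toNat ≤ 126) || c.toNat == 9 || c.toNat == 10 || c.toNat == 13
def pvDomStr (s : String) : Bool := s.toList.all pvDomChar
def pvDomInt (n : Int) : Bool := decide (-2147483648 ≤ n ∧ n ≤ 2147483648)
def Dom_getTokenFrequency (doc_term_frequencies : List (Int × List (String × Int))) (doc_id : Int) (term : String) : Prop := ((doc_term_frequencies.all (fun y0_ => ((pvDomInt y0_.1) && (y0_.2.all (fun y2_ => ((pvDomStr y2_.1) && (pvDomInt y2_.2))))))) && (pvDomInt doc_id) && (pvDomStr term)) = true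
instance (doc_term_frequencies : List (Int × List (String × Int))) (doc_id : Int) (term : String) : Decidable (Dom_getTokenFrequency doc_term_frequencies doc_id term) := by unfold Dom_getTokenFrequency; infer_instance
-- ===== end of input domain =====

-- B replaces A's iterative two-pointer binary search with recursive divide-and-conquer on
-- list slices (same comparison sequence, so the same value on every input): objective 'alternative'.

-- ===== PORT A =====
-- A's while loop over (left, right); term_freq_list[mid] is PySem.List.pyGet?
-- (the 'none' branch is Python's IndexError; it is unreachable from the 0 / len-1 call below).
def pvLoopA (lst : List (String × Int)) (term : String) (left right : Int) : Int :=
  if h : left ≤ right then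
    let mid := left + PySem.Int.floordiv (right - left) 2
    match PySem.List.pyGet? lst mid with
    | none => 0
    | some e =>
      if e.1 = term then e.2
      else if e.1 < term then pvLoopA lst term (mid + 1) right
      else pvLoopA lst term left (mid - 1)
  else 0
termination_by (right + 1 - left).toNat
decreasing_by
  · simp only [PySem.Int.floordiv_eq_ediv_of_pos (by omega : (0:Int) < 2)]; omega
  · simp only [PySem.Int.floordiv_eq_ediv_of_pos (by omega : (0:Int) < 2)]; omega

def getTokenFrequency (doc_term_frequencies : List (Int × List (String × Int))) (doc_id : Int) (term : String) : Int :=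
  let term_freq_list := (PySem.Dict.mk doc_term_frequencies).getD doc_id []
  pvLoopA term_freq_list term 0 (term_freq_list.length - 1)

-- ===== PORT B =====
-- Source B's recursive search on slices; mid : Nat equals Python's (len(lst)-1)//2 since lst ≠ [].
def pvSearchB (term : String) (lst : List (String × Int)) : Int :=
  if h : lst = [] then 0
  else
    let mid : Nat := (lst.length - 1) / 2
    match PySem.List.pyGet? lst (mid : Int) with
    | none => 0
    | some e =>
      if e.1 = term then e.2
      else if e.1 < term then pvSearchB term (PySem.List.slice lst (some ((mid : Int) + 1)) none)
      else pvSearchB term (PySem.List.slice lst none (some (mid : Int)))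
termination_by lst.length
decreasing_by
  · have : ((mid : Int) + 1) = (((mid + 1 : Nat) : Int)) := by push_cast; ring
    rw [this, PySem.List.slice_from_natCast]
    have hl : 0 < lst.length := List.length_pos_iff.mpr h
    simp [List.length_drop]; omega
  · rw [PySem.List.slice_to_natCast]
    have hl : 0 < lst.length := List.length_pos_iff.mpr h
    simp [List.length_take]
    omega

def getTokenFrequency_alt (doc_term_frequencies : List (Int × List (String × Int))) (doc_id : Int) (term : String) : Int :=
  pvSearchB term ((PySem.Dict.mk doc_term_frequencies).getD doc_id [])

-- ===== PRECONDITION & SPEC =====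
def Spec_getTokenFrequency (doc_term_frequencies : List (Int × List (String × Int))) (doc_id : Int) (term : String) (out : Int) : Prop := out = getTokenFrequency_alt doc_term_frequencies doc_id term
instance (doc_term_frequencies : List (Int × List (String × Int))) (doc_id : Int) (term : String) (out : Int) : Decidable (Spec_getTokenFrequency doc_term_frequencies doc_id term out) := by unfold Spec_getTokenFrequency; infer_instance

-- ===== CLAIM (what is proved, stated in full; the proofs are below) =====
def Claim_equal_getTokenFrequency : Prop := ∀ (doc_term_frequencies : List (Int × List (String × Int))) (doc_id : Int) (term : String), Dom_getTokenFrequency doc_term_frequencies doc_id term → Spec_getTokenFrequency doc_term_frequencies doc_id term (getTokenFrequency doc_term_frequencies doc_id term)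

-- ===== LEMMAS AND PROOFS =====

-- A's loop on window [l, r] of lst equals B's recursion on the slice lst[l : r+1].
theorem pvLoopA_eq_searchB (lst : List (String × Int)) (term : String) :
    ∀ (n : Nat) (l r : Int), (r + 1 - l).toNat ≤ n → 0 ≤ l → r < lst.length →
      pvLoopA lst term l r = pvSearchB term ((lst.drop l.toNat).take (r + 1 - l).toNat) := by
  intro n
  induction n with
  | zero =>
    intro l r hn hl hr
    have hempty : (r + 1 - l).toNat = 0 := by omega
    rw [pvLoopA, pvSearchB]
    simp [hempty, show ¬ l ≤ r by omega]
  | succ n ih =>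
    intro l r hn hl hr
    by_cases hlr : l ≤ r
    · have hfd : PySem.Int.floordiv (r - l) 2 = (r - l) / 2 :=
        PySem.Int.floordiv_eq_ediv_of_pos (by omega)
      set mid := l + PySem.Int.floordiv (r - l) 2 with hmiddef
      have hmidlo : l ≤ mid := by rw [hmiddef, hfd]; omega
      have hmidhi : mid ≤ r := by rw [hmiddef, hfd]; omega
      have hmidnat : mid.toNat < lst.length := by omega
      -- the window and its midpoint
      set w := (lst.drop l.toNat).take (r + 1 - l).toNat with hwdef
      have hwlen : w.length = (r + 1 - l).toNat := by
        rw [hwdef]; simp [List.length_take, List.length_drop]; omega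
      have hwne : w ≠ [] := by
        intro h; rw [h] at hwlen; simp at hwlen; omega
      set m : Nat := mid.toNat - l.toNat with hmdef
      have hm' : mid.toNat = l.toNat + m := by omega
      have hmB : (w.length - 1) / 2 = m := by
        rw [hwlen, hmdef, hmiddef, hfd]; omega
      have hmlt : m < (r + 1 - l).toNat := by omega
      -- the two programs inspect the same element
      have hgetA : PySem.List.pyGet? lst mid = some (lst[mid.toNat]'hmidnat) := by
        exact PySem.List.pyGet?_eq_some_getElem lst (by omega) (by omega)
      have hwelem : w[m]? = some (lst[mid.toNat]'hmidnat) := by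
        rw [hwdef, List.getElem?_take_of_lt hmlt, List.getElem?_drop]
        rw [show l.toNat + m = mid.toNat by omega]
        exact List.getElem?_eq_getElem hmidnat
      have hgetB : PySem.List.pyGet? w ((m : Nat) : Int) = some (lst[mid.toNat]'hmidnat) := by
        rw [PySem.List.pyGet?_natCast, hwelem]
      rw [pvLoopA, pvSearchB, dif_pos hlr, dif_neg hwne]
      simp only [← hmiddef, hgetA, hmB, hgetB]
      by_cases heq : (lst[mid.toNat]'hmidnat).1 = term
      · simp [heq]
      · simp only [heq, if_false]
        by_cases hlt : (lst[mid.toNat]'hmidnat).1 < term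
        · -- A recurses on [mid+1, r]; B on the slice w[m+1:]
          simp only [hlt, if_true]
          rw [ih (mid + 1) r (by omega) (by omega) hr]
          rw [show ((m : Int) + 1) = (((m + 1 : Nat) : Int)) by push_cast; ring]
          rw [PySem.List.slice_from_natCast, hwdef, List.drop_take, List.drop_drop]
          rw [show (mid + 1).toNat = l.toNat + (m + 1) by omega]
          rw [show (r + 1 - (mid + 1)).toNat = (r + 1 - l).toNat - (m + 1) by omega]
        · -- A recurses on [l, mid-1]; B on the slice w[:m]
          simp only [hlt, if_false]
          rw [ih l (mid - 1) (by omega) hl (by omega)]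
          rw [PySem.List.slice_to_natCast, hwdef, List.take_take]
          rw [show (mid - 1 + 1 - l).toNat = m by omega]
          rw [show min m (r + 1 - l).toNat = m by omega]
    · have hempty : (r + 1 - l).toNat = 0 := by omega
      rw [pvLoopA, pvSearchB]
      simp [hempty, hlr]

-- ===== VERDICT (by name: the statement is the Claim_ definition above) =====
theorem getTokenFrequency_spec : Claim_equal_getTokenFrequency := by
  intro dtf doc_id term _
  unfold Spec_getTokenFrequency getTokenFrequency getTokenFrequency_alt
  set lst := (PySem.Dict.mk dtf).getD doc_id [] with hlst
  have := pvLoopA_eq_searchB lst term lst.length 0 (lst.length - 1)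
    (by omega) (by omega) (by omega)
  simpa using this
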